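-- pv_equiv track=rewrite | github.com/Avoceous/mcp-fortress | mcpshield/detectors/bad_engine.py | _sequence_matches
-- ===== SOURCE A (Python) =====
-- from typing import Dict, List, Optional, Tuple
--
-- def _sequence_matches(recent: List[str], signature: List[str]) -> bool:
--     """
--     Check if any subsequence of recent calls matches the attack signature.
--     Uses substring matching so 'read' matches 'read_file', 'filesystem_read', etc.
--     """
--     if len(signature) > len(recent):
--         return False
--
--     # Sliding window
--     for start in range(len(recent) - len(signature) + 1):
--         window = recent[start: start + len(signature)]
--         if all(sig_token in call_name for sig_token, call_name in zip(signature, window)):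
--             return True
--     return False
-- ===== SOURCE B (Python) =====
-- def _sequence_matches(recent, signature):
--     """Column-wise pruning: keep the set of still-viable window start offsets
--     and shrink it one signature token at a time."""
--     if len(signature) > len(recent):
--         return False
--     candidates = list(range(len(recent) - len(signature) + 1))
--     for t, token in enumerate(signature):
--         candidates = [s for s in candidates if token in recent[s + t]]
--         if not candidates:
--             return False
--     return True
-- ===== Notes on version B (the rewrite author's own statement) =====
-- stated objective: alternative
-- what changed: Replaced the window-by-window sliding scan with a column-wise pruning pass: a shrinking list of still-viable start offsets is filtered once per signature token, exiting as soon as it empties.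
import Mathlib
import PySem

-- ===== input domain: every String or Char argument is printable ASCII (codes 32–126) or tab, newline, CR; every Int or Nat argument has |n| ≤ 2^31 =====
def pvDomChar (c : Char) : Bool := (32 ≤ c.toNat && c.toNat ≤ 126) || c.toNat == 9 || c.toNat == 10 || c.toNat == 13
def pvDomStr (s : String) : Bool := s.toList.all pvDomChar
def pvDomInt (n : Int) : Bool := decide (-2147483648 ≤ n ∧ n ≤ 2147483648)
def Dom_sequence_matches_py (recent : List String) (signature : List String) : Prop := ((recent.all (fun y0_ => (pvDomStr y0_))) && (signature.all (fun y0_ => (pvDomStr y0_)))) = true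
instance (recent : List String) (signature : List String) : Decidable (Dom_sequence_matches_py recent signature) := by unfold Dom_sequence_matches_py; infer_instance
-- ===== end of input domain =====

-- B replaces the window-by-window sliding scan with a column-wise pruning pass over a
-- shrinking list of still-viable start offsets (objective: alternative, same cost).

-- ===== PORT A =====
def sequence_matches_py (recent : List String) (signature : List String) : Bool :=
  if signature.length > recent.length then false
  else
    (PySem.List.pyRange 0 ((recent.length : Int) - (signature.length : Int) + 1) 1).any
      (fun start =>
        let window := PySem.List.slice recent (some start) (some (start + (signature.length : Int)))
        (signature.zip window).all (fun p => PySem.Str.isIn p.1 p.2))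

-- ===== PORT B =====
-- the for-loop over enumerate(signature) with its pruned candidate list and early return
-- (indexing recent[s+t] is always in range by the loop invariant; getD is exact there)
def altPrune (recent : List String) : Nat → List String → List Nat → Bool
  | _, [], _ => true
  | t, token :: rest, cands =>
      let cands' := cands.filter (fun s => PySem.Str.isIn token (recent.getD (s + t) ""))
      if cands'.isEmpty then false else altPrune recent (t + 1) rest cands'

def sequence_matches_py_alt (recent : List String) (signature : List String) : Bool :=
  if signature.length > recent.length then false
  else altPrune recent 0 signature (List.range (recent.length - signature.length + 1))

-- ===== PRECONDITION & SPEC =====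
def Spec_sequence_matches_py (recent : List String) (signature : List String) (out : Bool) : Prop := out = sequence_matches_py_alt recent signature
instance (recent : List String) (signature : List String) (out : Bool) : Decidable (Spec_sequence_matches_py recent signature out) := by unfold Spec_sequence_matches_py; infer_instance

-- ===== CLAIM (what is proved, stated in full; the proofs are below) =====
def Claim_equal_sequence_matches_py : Prop := ∀ (recent : List String) (signature : List String), Dom_sequence_matches_py recent signature → Spec_sequence_matches_py recent signature (sequence_matches_py recent signature)

-- ===== LEMMAS AND PROOFS =====

-- "the tokens toks all substring-match recent at consecutive indices starting at i"
def matchFrom (recent : List String) : Nat → List String → Bool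
  | _, [] => true
  | i, tok :: rest => PySem.Str.isIn tok (recent.getD i "") && matchFrom recent (i + 1) rest

theorem any_congr_mem {α : Type} {l : List α} {f g : α → Bool}
    (h : ∀ x ∈ l, f x = g x) : l.any f = l.any g := by
  induction l with
  | nil => rfl
  | cons a t ih =>
      simp only [List.any_cons, h a (by simp), ih (fun x hx => h x (by simp [hx]))]

theorem altPrune_eq (recent : List String) (toks : List String) :
    ∀ (t : Nat) (cands : List Nat), cands ≠ [] →
      altPrune recent t toks cands = cands.any (fun s => matchFrom recent (s + t) toks) := by
  induction toks with
  | nil =>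
      intro t cands h
      cases cands with
      | nil => exact absurd rfl h
      | cons a l => simp [altPrune, matchFrom]
  | cons tok rest ih =>
      intro t cands h
      simp only [altPrune]
      by_cases he : (cands.filter (fun s => PySem.Str.isIn tok (recent.getD (s + t) ""))).isEmpty
      · simp only [he, if_true]
        rw [List.isEmpty_iff, List.filter_eq_nil_iff] at he
        symm
        simp only [List.any_eq_false]
        intro s hs
        simp only [matchFrom, Bool.and_eq_true, not_and]
        intro hIn
        exact absurd hIn (by simpa using he s hs)
      · simp only [he]
        rw [ih (t + 1) _ (by simpa [List.isEmpty_iff] using he)]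
        rw [List.any_filter]
        apply any_congr_mem
        intro s _
        simp [matchFrom, Nat.add_assoc]

theorem window_eq_matchFrom (recent : List String) (toks : List String) :
    ∀ (i : Nat), i + toks.length ≤ recent.length →
      (toks.zip ((recent.drop i).take toks.length)).all (fun p => PySem.Str.isIn p.1 p.2)
        = matchFrom recent i toks := by
  induction toks with
  | nil => intro i _; rfl
  | cons tok rest ih =>
      intro i hle
      have hi : i < recent.length := by simp at hle; omega
      rw [List.drop_eq_getElem_cons hi]
      simp only [List.length_cons, List.take_succ_cons, List.zip_cons_cons, List.all_cons]
      rw [ih (i + 1) (by simp at hle ⊢; omega)]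
      simp [matchFrom, List.getD_eq_getElem?_getD, hi]

theorem ports_agree (recent : List String) (signature : List String) :
    sequence_matches_py recent signature = sequence_matches_py_alt recent signature := by
  unfold sequence_matches_py sequence_matches_py_alt
  by_cases hlen : signature.length > recent.length
  · simp [hlen]
  · simp only [hlen, if_false]
    have hm : signature.length ≤ recent.length := Nat.le_of_not_lt hlen
    have hK : (recent.length : Int) - (signature.length : Int) + 1
        = ((recent.length - signature.length + 1 : Nat) : Int) := by push_cast [hm]; ring
    rw [hK, PySem.List.pyRange_zero_nat, List.any_map]
    rw [altPrune_eq recent signature 0 _ (by simp)]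
    apply any_congr_mem
    intro k hk
    have hk' : k < recent.length - signature.length + 1 := List.mem_range.mp hk
    simp only [Function.comp]
    rw [PySem.List.slice_natCast_add, window_eq_matchFrom recent signature k (by omega), Nat.add_zero]

-- ===== VERDICT (by name: the statement is the Claim_ definition above) =====
theorem sequence_matches_py_spec : Claim_equal_sequence_matches_py := by
  intro recent signature _
  exact ports_agree recent signature
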